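-- pv_equiv track=rewrite | github.com/pukhovkirill/web-utils | qr/generator/qr_generator.py | generate_version_information
-- ===== SOURCE A (Python) =====
-- def generate_version_information(version):
--     """
--     Return 18-bit version information (6 data + 12 EC bits) for version ≥7.
--     """
--     if version < 7:
--         return None
--     data = int(f'{version:06b}' + '0' * 12, 2)
--     poly_g = 0b1111100100101
--     for _ in range(6):
--         shift = data.bit_length() - poly_g.bit_length()
--         if shift >= 0:
--             data ^= poly_g << shift
--     ec_bits = f'{data:012b}'
--     return f'{version:06b}' + ec_bits
-- ===== SOURCE B (Python) =====
-- # EC contribution of each version data bit: _EC[k] = remainder of x^(12+k) mod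
-- # g(x) = x^12+x^11+x^10+x^9+x^8+x^5+x^2+1 over GF(2) (fixed constants of the
-- # QR BCH(18,6) code).
-- _EC = (0xF25, 0x16F, 0x2DE, 0x5BC, 0xB78, 0x9D5)
--
--
-- def generate_version_information(version):
--     """
--     Return the QR version-information bit string (six data bits followed by
--     twelve error-correction bits) for version >= 7.  By linearity of GF(2)
--     remainders, the EC field is the XOR of the table
--     entries of the set version bits -- no long division at run time.
--     """
--     if version < 7:
--         return None
--     ec = 0
--     for k in range(6):
--         if (version >> k) & 1:
--             ec ^= _EC[k]
--     return f'{version:06b}' + f'{ec:012b}'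
-- ===== Notes on version B (the rewrite author's own statement) =====
-- stated objective: alternative
-- what changed: Replaces A's run-time GF(2) long division (six bit_length-driven top-bit eliminations on a value parsed back from a binary string) by a hardcoded six-entry syndrome table (remainder of x^(twelve+k) mod g) XOR-folded over the set bits of version, exploiting linearity of GF(2) remainders; Pre_ restricts to version < 64, the six-bit QR version range, outside which A's binary formatting of version overflows six characters and its six-round reduction is incomplete, so the returned string is not an eighteen-bit version-information word.
-- outside the precondition, e.g. on generate_version_information(64): A returns '1000000110010001111', B returns '1000000000000000000'
import Mathlib
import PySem

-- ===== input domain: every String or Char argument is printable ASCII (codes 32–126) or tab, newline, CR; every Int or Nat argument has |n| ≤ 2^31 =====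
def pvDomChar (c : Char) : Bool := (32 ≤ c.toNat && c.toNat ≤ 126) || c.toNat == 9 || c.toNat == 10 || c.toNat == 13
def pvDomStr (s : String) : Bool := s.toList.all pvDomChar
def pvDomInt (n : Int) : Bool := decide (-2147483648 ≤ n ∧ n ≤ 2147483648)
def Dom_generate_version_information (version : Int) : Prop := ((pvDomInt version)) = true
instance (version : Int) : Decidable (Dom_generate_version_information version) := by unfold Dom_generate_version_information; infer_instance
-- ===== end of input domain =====

-- B replaces A's run-time GF(2) long division by a hardcoded syndrome table XOR-folded
-- over the set version bits (objective: alternative).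

-- ===== PORT A =====

-- shared formatting helpers (Python f'{n:0wb}' and int(s, 2) on binary strings, exact for n ≥ 0)
def pvBinDigitsAux : Nat → Nat → List Char
  | 0, _ => []
  | _, 0 => []
  | fuel+1, n+1 => pvBinDigitsAux fuel ((n+1)/2) ++ [if (n+1) % 2 = 1 then '1' else '0']

-- fuel = n suffices since the argument halves each step
def pvBinDigits (n : Nat) : List Char := pvBinDigitsAux n n

-- digits of n (Python's bin(n) without prefix, n ≥ 0)
def pvDigits (n : Nat) : List Char := if n = 0 then ['0'] else pvBinDigits n

-- f'{n:0wb}' for n ≥ 0: binary digits left-padded with '0' to width w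
def pvFmtB (w : Nat) (n : Nat) : String :=
  String.ofList (List.replicate (w - (pvDigits n).length) '0' ++ pvDigits n)

-- int(s, 2) for a string of '0'/'1' digits
def pvParseBin (l : List Char) : Nat :=
  l.foldl (fun a c => 2 * a + (if c = '1' then 1 else 0)) 0

-- Python's int.bit_length() for n ≥ 0
def pvBitLengthAux : Nat → Nat → Nat
  | 0, _ => 0
  | _, 0 => 0
  | fuel+1, n+1 => pvBitLengthAux fuel ((n+1)/2) + 1

-- fuel = n suffices since the argument halves each step
def pvBitLength (n : Nat) : Nat := pvBitLengthAux n n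

def pvPolyG : Nat := 7973  -- 0b1111100100101

-- one iteration of A's loop body (shift = data.bit_length() - poly_g.bit_length())
def pvStepA (d : Nat) : Nat :=
  let shift : Int := (pvBitLength d : Int) - (pvBitLength pvPolyG : Int)
  if 0 ≤ shift then d ^^^ (pvPolyG <<< shift.toNat) else d

-- for _ in range(6): … (k iterations)
def pvIterA : Nat → Nat → Nat
  | 0, d => d
  | k+1, d => pvIterA k (pvStepA d)

def generate_version_information (version : Int) : Option String :=
  if version < 7 then none
  else
    -- version ≥ 7 here, so working in Nat via toNat is exact
    let v := version.toNat
    -- data = int(f'{version:06b}' + '0' * 12, 2)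
    let data := pvParseBin ((pvFmtB 6 v).toList ++ List.replicate 12 '0')
    let data2 := pvIterA 6 data
    -- f'{version:06b}' + f'{data:012b}'
    some (pvFmtB 6 v ++ pvFmtB 12 data2)

-- ===== PORT B =====

-- _EC[k] = remainder of x^(12+k) mod g over GF(2), hardcoded constants (Source B's _EC)
def pvEC : List Nat := [0xF25, 0x16F, 0x2DE, 0x5BC, 0xB78, 0x9D5]

-- Source B's loop: for k in range(6): if (version >> k) & 1: ec ^= _EC[k]
def generate_version_information_alt (version : Int) : Option String :=
  if version < 7 then none
  else
    let v := version.toNat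
    let ec := (List.range 6).foldl
      (fun ec k => if Nat.testBit v k then ec ^^^ pvEC.getD k 0 else ec) 0
    some (pvFmtB 6 v ++ pvFmtB 12 ec)

-- ===== PRECONDITION & SPEC =====
-- Pre_ restricts to the six-bit QR version range: for version ≥ 64 (outside any real QR
-- version) A's binary formatting of version overflows six characters and its fixed
-- six-round reduction is incomplete, so A's returned string is not an eighteen-bit
-- version-information word.
def Pre_generate_version_information (version : Int) : Prop := version < 64
instance (version : Int) : Decidable (Pre_generate_version_information version) := by
  unfold Pre_generate_version_information; infer_instance

def pvWitness_generate_version_information : Int := 7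

def Spec_generate_version_information (version : Int) (out : Option String) : Prop := out = generate_version_information_alt version
instance (version : Int) (out : Option String) : Decidable (Spec_generate_version_information version out) := by unfold Spec_generate_version_information; infer_instance

-- ===== CLAIM =====
def Claim_equal_generate_version_information : Prop := ∀ (version : Int), Dom_generate_version_information version → Pre_generate_version_information version → Spec_generate_version_information version (generate_version_information version)

-- ===== LEMMAS AND PROOFS =====

-- the two loop results agree on every 6-bit version value (finite check)
set_option maxRecDepth 100000 in
theorem pv_body_eq : ∀ n : Fin 64,
    pvIterA 6 (pvParseBin ((pvFmtB 6 n.val).toList ++ List.replicate 12 '0'))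
      = (List.range 6).foldl
          (fun ec k => if Nat.testBit n.val k then ec ^^^ pvEC.getD k 0 else ec) 0 := by
  decide

-- ===== VERDICT =====
theorem generate_version_information_spec : Claim_equal_generate_version_information := by
  unfold Claim_equal_generate_version_information
  intro version _ hpre
  unfold Spec_generate_version_information generate_version_information generate_version_information_alt
  by_cases h : version < 7
  · rw [if_pos h, if_pos h]
  · rw [if_neg h, if_neg h]
    have hlt : version.toNat < 64 := by
      unfold Pre_generate_version_information at hpre; omega
    have h2 := pv_body_eq ⟨version.toNat, hlt⟩
    show some (pvFmtB 6 version.toNat ++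
        pvFmtB 12 (pvIterA 6 (pvParseBin ((pvFmtB 6 version.toNat).toList ++ List.replicate 12 '0'))))
      = some (pvFmtB 6 version.toNat ++
        pvFmtB 12 ((List.range 6).foldl
          (fun ec k => if Nat.testBit version.toNat k then ec ^^^ pvEC.getD k 0 else ec) 0))
    rw [h2]
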